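-- pv_equiv track=rewrite | github.com/vonwao/game-13 | scripts/build_common_words.py | merge_ranked_lists
-- ===== SOURCE A (Python) =====
-- def merge_ranked_lists(buckets: dict[str, list[str]]) -> list[str]:
--     merged: list[str] = []
--     seen: set[str] = set()
--     nouns = buckets.get("nouns", [])
--     adjs = buckets.get("adjs", [])
--     verbs = buckets.get("verbs", [])
--     max_len = max(len(nouns), len(adjs), len(verbs))
--
--     for i in range(max_len):
--         for bucket in (nouns, nouns, adjs, verbs):
--             if i >= len(bucket):
--                 continue
--             word = bucket[i]
--             if word in seen:
--                 continue
--             seen.add(word)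
--             merged.append(word)
--
--     return merged
-- ===== SOURCE B (Python) =====
-- def merge_ranked_lists(buckets: dict[str, list[str]]) -> list[str]:
--     # Three reversed stacks popped round-robin until all are exhausted;
--     # duplicates are removed afterwards in one dict.fromkeys pass.
--     sn = list(reversed(buckets.get("nouns", [])))
--     sa = list(reversed(buckets.get("adjs", [])))
--     sv = list(reversed(buckets.get("verbs", [])))
--     flat: list[str] = []
--     while sn or sa or sv:
--         if sn:
--             flat.append(sn.pop())
--         if sa:
--             flat.append(sa.pop())
--         if sv:
--             flat.append(sv.pop())
--     return list(dict.fromkeys(flat))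
-- ===== Notes on version B (the rewrite author's own statement) =====
-- stated objective: alternative
-- what changed: A loops an index i over range(max_len) and fuses deduplication into the loop with a 'seen' set (with a redundant doubled 'nouns' bucket); B has no indices, no max_len and no seen-set: it reverses the three buckets into stacks, pops their tops round-robin in a while loop until all are empty, and deduplicates the flat result in a separate dict.fromkeys pass.
import Mathlib
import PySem

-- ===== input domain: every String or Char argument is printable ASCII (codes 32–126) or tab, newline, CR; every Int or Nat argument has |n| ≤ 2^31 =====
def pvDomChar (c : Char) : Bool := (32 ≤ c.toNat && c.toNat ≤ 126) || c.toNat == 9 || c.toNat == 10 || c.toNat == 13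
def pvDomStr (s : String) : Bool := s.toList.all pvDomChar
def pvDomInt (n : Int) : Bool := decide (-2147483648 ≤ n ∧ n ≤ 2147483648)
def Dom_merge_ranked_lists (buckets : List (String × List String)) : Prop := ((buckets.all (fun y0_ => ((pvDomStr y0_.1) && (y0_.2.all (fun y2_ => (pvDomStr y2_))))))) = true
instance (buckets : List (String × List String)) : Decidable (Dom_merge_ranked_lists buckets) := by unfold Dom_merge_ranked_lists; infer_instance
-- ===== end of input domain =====

-- B replaces A's index loop over range(max_len) with its fused seen-set dedup by a
-- round-robin pop over three reversed stacks followed by a separate dict.fromkeys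
-- dedup pass (A's doubled 'nouns' bucket is redundant); objective: alternative.

-- ===== PORT A =====
def merge_ranked_lists (buckets : List (String × List String)) : List String :=
  let d := PySem.Dict.mk buckets
  let nouns := d.getD "nouns" []
  let adjs := d.getD "adjs" []
  let verbs := d.getD "verbs" []
  let max_len := max (max nouns.length adjs.length) verbs.length
  let st :=
    (PySem.List.pyRange 0 (max_len : Int) 1).foldl
      (fun st i =>
        [nouns, nouns, adjs, verbs].foldl
          (fun st bucket =>
            if i < (bucket.length : Int) then
              let word := PySem.List.pyGetD bucket i ""   -- in range by the guard
              if st.2.contains word then st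
              else (st.1 ++ [word], st.2.add word)
            else st)
          st)
      (([] : List String), (PySem.Set.empty : PySem.Set String))
  st.1

-- ===== PORT B =====
-- the while loop of Source B: pop the top of each nonempty stack, append it to flat, repeat
def pvLoopB (sn sa sv flat : List String) : List String :=
  if _h : sn = [] ∧ sa = [] ∧ sv = [] then flat
  else
    let flat1 := if sn = [] then flat else flat ++ [sn.getLastD ""]
    let flat2 := if sa = [] then flat1 else flat1 ++ [sa.getLastD ""]
    let flat3 := if sv = [] then flat2 else flat2 ++ [sv.getLastD ""]
    pvLoopB sn.dropLast sa.dropLast sv.dropLast flat3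
termination_by sn.length + sa.length + sv.length
decreasing_by
  have h1 : sn ≠ [] ∨ sa ≠ [] ∨ sv ≠ [] := by tauto
  have h2 : 0 < sn.length + sa.length + sv.length := by
    rcases h1 with h' | h' | h' <;> have := List.length_pos_of_ne_nil h' <;> omega
  simp only [List.length_dropLast]
  omega

def merge_ranked_lists_alt (buckets : List (String × List String)) : List String :=
  let d := PySem.Dict.mk buckets
  let sn := (d.getD "nouns" []).reverse
  let sa := (d.getD "adjs" []).reverse
  let sv := (d.getD "verbs" []).reverse
  PySem.List.dedup (pvLoopB sn sa sv [])

-- ===== PRECONDITION & SPEC =====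
def Spec_merge_ranked_lists (buckets : List (String × List String)) (out : List String) : Prop := out = merge_ranked_lists_alt buckets
instance (buckets : List (String × List String)) (out : List String) : Decidable (Spec_merge_ranked_lists buckets out) := by unfold Spec_merge_ranked_lists; infer_instance

-- ===== CLAIM (what is proved, stated in full; the proofs are below) =====
def Claim_equal_merge_ranked_lists : Prop := ∀ (buckets : List (String × List String)), Dom_merge_ranked_lists buckets → Spec_merge_ranked_lists buckets (merge_ranked_lists buckets)

-- ===== LEMMAS AND PROOFS =====

-- the one word-processing step of A's loop
def pvStep (st : List String × PySem.Set String) (w : String) : List String × PySem.Set String :=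
  if st.2.contains w then st else (st.1 ++ [w], st.2.add w)

-- the words contributed by the buckets `bs` at column `i`
def pvContrib (bs : List (List String)) (i : Int) : List String :=
  bs.filterMap (fun b => if i < (b.length : Int) then some (PySem.List.pyGetD b i "") else none)

-- the forward-reading companion of pvLoopB: heads of the lists, then recurse on tails
def pvIl (n a v : List String) : List String :=
  if n = [] ∧ a = [] ∧ v = [] then []
  else
    ((if n = [] then [] else [n.headD ""]) ++ (if a = [] then [] else [a.headD ""]) ++
      (if v = [] then [] else [v.headD ""])) ++ pvIl n.tail a.tail v.tail
termination_by n.length + a.length + v.length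
decreasing_by
  rename_i h
  have h1 : n ≠ [] ∨ a ≠ [] ∨ v ≠ [] := by tauto
  have h2 : 0 < n.length + a.length + v.length := by
    rcases h1 with h' | h' | h' <;> have := List.length_pos_of_ne_nil h' <;> omega
  simp only [List.length_tail]
  omega

theorem pvStep_diag (s : PySem.Set String) (w : String) :
    pvStep (s, s) w = (s.add w, s.add w) := by
  unfold pvStep PySem.Set.add
  by_cases hm : w ∈ s <;> simp [hm]

theorem pvStep_step (st : List String × PySem.Set String) (w : String) :
    pvStep (pvStep st w) w = pvStep st w := by
  unfold pvStep
  by_cases hm : w ∈ st.2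
  · simp [hm]
  · simp [hm]

theorem pvFoldl_step_diag (l : List String) (s : PySem.Set String) :
    l.foldl pvStep (s, s) = (PySem.Set.update s l, PySem.Set.update s l) := by
  induction l generalizing s with
  | nil => rfl
  | cons w t ih =>
      simp only [List.foldl_cons, pvStep_diag]
      exact ih (s.add w)

theorem pvInnerA (bs : List (List String)) (i : Int) (st : List String × PySem.Set String) :
    bs.foldl
      (fun st bucket =>
        if i < (bucket.length : Int) then pvStep st (PySem.List.pyGetD bucket i "") else st)
      st
    = (pvContrib bs i).foldl pvStep st := by
  induction bs generalizing st with
  | nil => rfl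
  | cons b t ih =>
      simp only [List.foldl_cons, pvContrib, List.filterMap_cons]
      by_cases h : i < (b.length : Int)
      · simp only [h, if_pos]
        exact ih _
      · simp only [h, if_false]
        exact ih st

theorem pvContrib_dup (n : List String) (bs : List (List String)) (i : Int)
    (st : List String × PySem.Set String) :
    (pvContrib (n :: n :: bs) i).foldl pvStep st = (pvContrib (n :: bs) i).foldl pvStep st := by
  simp only [pvContrib, List.filterMap_cons]
  by_cases h : i < (n.length : Int)
  · simp only [h, if_pos, List.foldl_cons, pvStep_step]
  · simp [h]

theorem pvOuterA (idxs : List Int) (f : Int → List String) (s : PySem.Set String) :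
    idxs.foldl (fun st i => (f i).foldl pvStep st) (s, s)
    = (PySem.Set.update s (idxs.flatMap f), PySem.Set.update s (idxs.flatMap f)) := by
  induction idxs generalizing s with
  | nil => rfl
  | cons i t ih =>
      simp only [List.foldl_cons, List.flatMap_cons, pvFoldl_step_diag]
      rw [ih]
      simp [PySem.Set.update, List.foldl_append]

-- A's fold produces the dedup of the column-by-column flat list
theorem pvA_eq (nouns adjs verbs : List String) (idxs : List Int) :
    (idxs.foldl
      (fun st i =>
        [nouns, nouns, adjs, verbs].foldl
          (fun st bucket =>
            if i < (bucket.length : Int) then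
              let word := PySem.List.pyGetD bucket i ""
              if st.2.contains word then st
              else (st.1 ++ [word], st.2.add word)
            else st)
          st)
      (([] : List String), (PySem.Set.empty : PySem.Set String))).1
    = PySem.List.dedup (idxs.flatMap (fun i => pvContrib [nouns, adjs, verbs] i)) := by
  have hA : (fun (st : List String × PySem.Set String) (i : Int) =>
        [nouns, nouns, adjs, verbs].foldl
          (fun st bucket =>
            if i < (bucket.length : Int) then pvStep st (PySem.List.pyGetD bucket i "") else st)
          st)
      = fun st i => (pvContrib [nouns, adjs, verbs] i).foldl pvStep st := by
    funext st i
    rw [pvInnerA, pvContrib_dup]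
  show (idxs.foldl
      (fun st i =>
        [nouns, nouns, adjs, verbs].foldl
          (fun st bucket =>
            if i < (bucket.length : Int) then pvStep st (PySem.List.pyGetD bucket i "") else st)
          st)
      (([] : List String), (PySem.Set.empty : PySem.Set String))).1 = _
  rw [hA,
    show (([] : List String), (PySem.Set.empty : PySem.Set String))
        = ((PySem.Set.empty : PySem.Set String), (PySem.Set.empty : PySem.Set String)) from rfl,
    pvOuterA, PySem.List.dedup_eq_ofList, PySem.Set.ofList_eq_foldl]
  rfl

-- getLastD of a reversed list is the head (with the same default)
theorem pvLastD (l : List String) (d : String) : l.reverse.getLastD d = l.headD d := by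
  cases l with
  | nil => rfl
  | cons x t => simp

-- popping the reversed stacks front-to-back reads the original lists head-to-tail
theorem pvLoopB_eq (m : Nat) : ∀ (n a v flat : List String),
    n.length + a.length + v.length ≤ m →
    pvLoopB n.reverse a.reverse v.reverse flat = flat ++ pvIl n a v := by
  induction m with
  | zero =>
      intro n a v flat hm
      have hn : n = [] := by cases n <;> simp_all
      have ha : a = [] := by cases a <;> simp_all
      have hv : v = [] := by cases v <;> simp_all
      subst hn; subst ha; subst hv
      rw [pvLoopB, pvIl]
      simp
  | succ m ih =>
      intro n a v flat hm
      by_cases hall : n = [] ∧ a = [] ∧ v = []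
      · obtain ⟨h1, h2, h3⟩ := hall; subst h1; subst h2; subst h3
        rw [pvLoopB, pvIl]; simp
      · have hrev : ¬ (n.reverse = [] ∧ a.reverse = [] ∧ v.reverse = []) := by
          simp only [List.reverse_eq_nil_iff]; exact hall
        have hlen : n.tail.length + a.tail.length + v.tail.length ≤ m := by
          have h1 : n ≠ [] ∨ a ≠ [] ∨ v ≠ [] := by tauto
          have h2 : 0 < n.length + a.length + v.length := by
            rcases h1 with h' | h' | h' <;> have := List.length_pos_of_ne_nil h' <;> omega
          simp only [List.length_tail]; omega
        rw [pvLoopB, pvIl, dif_neg hrev, if_neg hall]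
        simp only [List.reverse_eq_nil_iff, List.dropLast_reverse, pvLastD]
        rw [ih n.tail a.tail v.tail _ hlen]
        by_cases hn : n = [] <;> by_cases ha : a = [] <;> by_cases hv : v = [] <;>
          simp_all

-- shifting a column index by one reads the tails
theorem pvContrib_succ (n a v : List String) (k : Nat) :
    pvContrib [n, a, v] (1 + (k : Int)) = pvContrib [n.tail, a.tail, v.tail] (0 + (k : Int)) := by
  have hb : ∀ (b : List String),
      (if (1 + (k : Int)) < (b.length : Int) then some (PySem.List.pyGetD b (1 + (k : Int)) "") else none)
      = (if ((0 : Int) + k) < (b.tail.length : Int) then some (PySem.List.pyGetD b.tail ((0 : Int) + k) "") else none) := by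
    intro b
    cases b with
    | nil =>
        simp only [List.tail_nil, List.length_nil]
        rw [if_neg (by omega), if_neg (by omega)]
    | cons x t =>
        simp only [List.tail_cons, List.length_cons]
        by_cases h : ((0 : Int) + k) < (t.length : Int)
        · rw [if_pos (by push_cast at h ⊢; omega), if_pos h]
          have e1 : (1 + (k : Int)) = (((k + 1 : Nat)) : Int) := by push_cast; ring
          have e2 : ((0 : Int) + k) = ((k : Nat) : Int) := by omega
          rw [e1, e2, PySem.List.pyGetD_natCast, PySem.List.pyGetD_natCast]
          simp
        · rw [if_neg (by push_cast at h ⊢; omega), if_neg h]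
  simp only [pvContrib, List.filterMap_cons, List.filterMap_nil, hb]

-- column 0 is exactly the heads of the nonempty lists
theorem pvContrib_zero (n a v : List String) :
    pvContrib [n, a, v] 0
    = (if n = [] then [] else [n.headD ""]) ++ (if a = [] then [] else [a.headD ""]) ++
        (if v = [] then [] else [v.headD ""]) := by
  have hb : ∀ (b : List String),
      (if (0 : Int) < (b.length : Int) then some (PySem.List.pyGetD b 0 "") else none)
      = (if b = [] then none else some (b.headD "")) := by
    intro b
    cases b with
    | nil => simp
    | cons x t =>
        rw [if_pos (by simp only [List.length_cons]; push_cast; omega), if_neg (List.cons_ne_nil x t)]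
        rw [show (0 : Int) = ((0 : Nat) : Int) from rfl, PySem.List.pyGetD_natCast]
        simp
  simp only [pvContrib, List.filterMap_cons, List.filterMap_nil, hb]
  by_cases hn : n = [] <;> by_cases ha : a = [] <;> by_cases hv : v = [] <;> simp [hn, ha, hv]

-- pvIl reads exactly the columns 0 .. max_len-1
theorem pvIl_flat (m : Nat) : ∀ (n a v : List String),
    max (max n.length a.length) v.length = m →
    pvIl n a v = (PySem.List.pyRange 0 (m : Int) 1).flatMap (fun i => pvContrib [n, a, v] i) := by
  induction m with
  | zero =>
      intro n a v hmax
      have hn : n = [] := by rw [← List.length_eq_zero_iff]; omega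
      have ha : a = [] := by rw [← List.length_eq_zero_iff]; omega
      have hv : v = [] := by rw [← List.length_eq_zero_iff]; omega
      subst hn; subst ha; subst hv
      rw [pvIl, show PySem.List.pyRange 0 (((0 : Nat)) : Int) 1 = []
        from PySem.List.pyRange_one_eq_nil (by norm_num)]
      simp
  | succ m ih =>
      intro n a v hmax
      have hall : ¬ (n = [] ∧ a = [] ∧ v = []) := by
        rintro ⟨h1, h2, h3⟩; subst h1; subst h2; subst h3; simp at hmax
      have htails : max (max n.tail.length a.tail.length) v.tail.length = m := by
        simp only [List.length_tail]; omega
      rw [pvIl, if_neg hall, ih n.tail a.tail v.tail htails]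
      have hcons : PySem.List.pyRange 0 (((m + 1 : Nat)) : Int) 1
          = 0 :: PySem.List.pyRange 1 (((m + 1 : Nat)) : Int) 1 := by
        have h := PySem.List.pyRange_one_cons (a := 0) (b := ((m + 1 : Nat) : Int))
          (by push_cast; omega)
        simpa using h
      have hr1 : PySem.List.pyRange 1 (((m + 1 : Nat)) : Int) 1
          = (List.range m).map (fun (k : Nat) => (1 : Int) + (k : Int)) := by
        rw [PySem.List.pyRange_one,
          show ((((m + 1 : Nat)) : Int) - 1).toNat = m by push_cast; omega]
      have hr0 : PySem.List.pyRange 0 (((m : Nat)) : Int) 1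
          = (List.range m).map (fun (k : Nat) => (0 : Int) + (k : Int)) := by
        rw [PySem.List.pyRange_one, show ((((m : Nat)) : Int) - 0).toNat = m by omega]
      rw [hr0, hcons, hr1]
      simp only [List.flatMap_cons, List.flatMap_map, pvContrib_zero, List.append_assoc]
      congr 1
      congr 1
      congr 1
      exact congrArg (fun f => List.flatMap f (List.range m))
        (funext fun k => (pvContrib_succ n a v k).symm)

-- B's stack loop followed by dedup equals the dedup of the flat column list
theorem pvB_eq (n a v : List String) :
    PySem.List.dedup (pvLoopB n.reverse a.reverse v.reverse [])
    = PySem.List.dedup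
        ((PySem.List.pyRange 0 ((max (max n.length a.length) v.length : Nat) : Int) 1).flatMap
          (fun i => pvContrib [n, a, v] i)) := by
  rw [pvLoopB_eq (n.length + a.length + v.length) n a v [] le_rfl, List.nil_append,
    pvIl_flat (max (max n.length a.length) v.length) n a v rfl]

-- ===== VERDICT (by name: the statement is the Claim_ definition above) =====
theorem merge_ranked_lists_spec : Claim_equal_merge_ranked_lists := by
  intro buckets _
  show merge_ranked_lists buckets = merge_ranked_lists_alt buckets
  unfold merge_ranked_lists merge_ranked_lists_alt
  simp only [pvA_eq, pvB_eq]
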